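-- pv_equiv track=rewrite | github.com/ericktech3/Tibia-Tools | integrations/tibiadata.py | _guildstats_blocked_or_empty
-- ===== SOURCE A (Python) =====
-- def _guildstats_blocked_or_empty(html_text: str) -> bool:
--     low = (html_text or "").lower()
--     if not low.strip():
--         return True
--     block_markers = (
--         "checking your browser",
--         "just a moment",
--         "cf-browser-verification",
--         "attention required",
--         "verify you are human",
--         "enable javascript",
--         "access denied",
--         "captcha",
--         "security check",
--     )
--     return any(marker in low for marker in block_markers)
-- ===== SOURCE B (Python) =====
-- _BLOCK_MARKERS = (
--     "checking your browser",
--     "just a moment",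
--     "cf-browser-verification",
--     "attention required",
--     "verify you are human",
--     "enable javascript",
--     "access denied",
--     "captcha",
--     "security check",
-- )
--
--
-- def _guildstats_blocked_or_empty(html_text: str) -> bool:
--     low = (html_text or "").lower()
--     if not low.strip():
--         return True
--     # single left-to-right scan: at each position test every marker as a prefix
--     for i in range(len(low)):
--         if any(low.startswith(m, i) for m in _BLOCK_MARKERS):
--             return True
--     return False
-- ===== Notes on version B (the rewrite author's own statement) =====
-- stated objective: alternative
-- what changed: Replaces nine independent full-text substring-containment scans (one per block marker) with a single left-to-right scan over the lowercased text that at each position tests every marker as a prefix via startswith with an offset.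
import Mathlib
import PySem

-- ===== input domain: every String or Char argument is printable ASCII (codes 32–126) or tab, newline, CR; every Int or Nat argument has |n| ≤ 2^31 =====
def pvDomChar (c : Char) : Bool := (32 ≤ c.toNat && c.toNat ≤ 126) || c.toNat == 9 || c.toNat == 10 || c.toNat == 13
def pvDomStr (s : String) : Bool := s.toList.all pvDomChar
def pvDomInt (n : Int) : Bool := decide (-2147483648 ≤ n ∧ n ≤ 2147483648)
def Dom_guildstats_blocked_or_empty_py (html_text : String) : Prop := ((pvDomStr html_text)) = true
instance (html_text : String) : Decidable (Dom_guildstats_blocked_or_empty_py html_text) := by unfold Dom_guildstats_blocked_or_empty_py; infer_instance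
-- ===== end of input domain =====

-- B replaces nine independent full-text substring scans with one left-to-right scan
-- testing every marker as a prefix at each position (alternative, same cost).

-- ===== PORT A =====
def pvMarkers : List (List Char) :=
  [ "checking your browser".toList
  , "just a moment".toList
  , "cf-browser-verification".toList
  , "attention required".toList
  , "verify you are human".toList
  , "enable javascript".toList
  , "access denied".toList
  , "captcha".toList
  , "security check".toList ]

def guildstats_blocked_or_empty_py (html_text : String) : Bool :=
  -- low = (html_text or "").lower(): for strings 'html_text or ""' is html_text itself
  -- when nonempty and "" when empty, so its lowercase is lower(html_text) in both cases
  let low := PySem.Chars.lower html_text.toList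
  if PySem.Chars.strip low = [] then true  -- 'not low.strip()'
  else pvMarkers.any (fun m => PySem.Chars.isIn m low)  -- any(marker in low ...)

-- ===== PORT B =====
-- one pass: at each suffix (= low.startswith(m, i)), test every marker as a prefix
def pvScanB (low : List Char) : Bool :=
  match low with
  | [] => false
  | c :: rest =>
      pvMarkers.any (fun m => PySem.Chars.startswith (c :: rest) m) || pvScanB rest

def guildstats_blocked_or_empty_py_alt (html_text : String) : Bool :=
  let low := PySem.Chars.lower html_text.toList
  if PySem.Chars.strip low = [] then true
  else pvScanB low

-- ===== PRECONDITION & SPEC =====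
def Spec_guildstats_blocked_or_empty_py (html_text : String) (out : Bool) : Prop := out = guildstats_blocked_or_empty_py_alt html_text
instance (html_text : String) (out : Bool) : Decidable (Spec_guildstats_blocked_or_empty_py html_text out) := by unfold Spec_guildstats_blocked_or_empty_py; infer_instance

-- ===== CLAIM (what is proved, stated in full; the proofs are below) =====
def Claim_equal_guildstats_blocked_or_empty_py : Prop := ∀ (html_text : String), Dom_guildstats_blocked_or_empty_py html_text → Spec_guildstats_blocked_or_empty_py html_text (guildstats_blocked_or_empty_py html_text)

-- ===== LEMMAS AND PROOFS =====
-- the single-pass prefix scan finds a marker iff some marker is an infix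
lemma pvScanB_eq_any_isIn (l : List Char) :
    pvScanB l = pvMarkers.any (fun m => PySem.Chars.isIn m l) := by
  induction l with
  | nil => decide
  | cons c rest ih =>
    show (pvMarkers.any (fun m => PySem.Chars.startswith (c :: rest) m) || pvScanB rest) = _
    rw [ih]
    apply Bool.eq_iff_iff.mpr
    simp only [Bool.or_eq_true, List.any_eq_true, PySem.Chars.startswith_iff,
      PySem.Chars.isIn_iff_infix, List.infix_cons_iff]
    constructor
    · rintro (⟨m, hm, h⟩ | ⟨m, hm, h⟩)
      · exact ⟨m, hm, Or.inl h⟩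
      · exact ⟨m, hm, Or.inr h⟩
    · rintro ⟨m, hm, h | h⟩
      · exact Or.inl ⟨m, hm, h⟩
      · exact Or.inr ⟨m, hm, h⟩

-- ===== VERDICT (by name: the statement is the Claim_ definition above) =====
theorem guildstats_blocked_or_empty_py_spec : Claim_equal_guildstats_blocked_or_empty_py := by
  intro html_text _
  unfold Spec_guildstats_blocked_or_empty_py
  unfold guildstats_blocked_or_empty_py guildstats_blocked_or_empty_py_alt
  simp only [pvScanB_eq_any_isIn]
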